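-- pv_equiv track=rewrite | github.com/SurajBhar/cfw | scripts/smoke/make_driveact_smoke_csv.py | get_activity_column_index
-- ===== SOURCE A (Python) =====
-- from typing import Dict, List
--
-- def get_activity_column_index(header: List[str]) -> int:
--     """Find activity/class column index in Drive&Act CSV header."""
--     normalized = [h.strip().lower() for h in header]
--     for key in ("activity", "action", "label", "class"):
--         if key in normalized:
--             return normalized.index(key)
--
--     # Fallback to known Drive&Act layout:
--     # participant_id,file_id,annotation_id,frame_start,frame_end,activity,chunk_id
--     if len(header) > 5:
--         return 5
--     raise ValueError(
--         "Could not infer activity column from CSV header. "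
--         "Expected one of: activity/action/label/class."
--     )
-- ===== SOURCE B (Python) =====
-- def get_activity_column_index(header):
--     """Find activity/class column index in Drive&Act CSV header."""
--     ranks = {"activity": 0, "action": 1, "label": 2, "class": 3}
--     best_rank = None
--     best_idx = None
--     for i, h in enumerate(header):
--         r = ranks.get(h.strip().lower())
--         if r is not None and (best_rank is None or r < best_rank):
--             best_rank, best_idx = r, i
--     if best_idx is not None:
--         return best_idx
--     if len(header) > 5:
--         return 5
--     raise ValueError(
--         "Could not infer activity column from CSV header. "
--         "Expected one of: activity/action/label/class."
--     )
-- ===== Notes on version B (the rewrite author's own statement) =====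
-- stated objective: alternative
-- what changed: Replaces the four membership tests plus repeated list.index scans over a precomputed normalized list with a single pass over the header that normalizes each cell once and keeps the best-priority (earliest on ties) match via a rank map.
import Mathlib
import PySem

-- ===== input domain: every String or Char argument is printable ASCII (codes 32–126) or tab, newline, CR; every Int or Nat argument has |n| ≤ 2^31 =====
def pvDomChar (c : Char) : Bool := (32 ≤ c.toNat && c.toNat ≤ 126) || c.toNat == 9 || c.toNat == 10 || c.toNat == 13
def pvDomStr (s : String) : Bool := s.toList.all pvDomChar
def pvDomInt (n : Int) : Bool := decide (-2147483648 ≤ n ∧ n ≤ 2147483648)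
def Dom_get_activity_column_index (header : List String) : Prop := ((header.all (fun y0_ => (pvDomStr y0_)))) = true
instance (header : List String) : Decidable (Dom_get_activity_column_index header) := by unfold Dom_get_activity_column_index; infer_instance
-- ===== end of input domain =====

-- B replaces A's four membership tests plus repeated list.index scans with a single pass
-- keeping the best-priority match via a rank map (objective: alternative decomposition).

-- ===== PORT A =====
-- h.strip().lower()
def pvNorm (h : String) : String := PySem.Str.lower (PySem.Str.strip h)

def get_activity_column_index (header : List String) : Int :=
  let normalized := header.map pvNorm
  if "activity" ∈ normalized then
    match PySem.List.index? normalized "activity" with | some n => (n : Int) | none => 0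
  else if "action" ∈ normalized then
    match PySem.List.index? normalized "action" with | some n => (n : Int) | none => 0
  else if "label" ∈ normalized then
    match PySem.List.index? normalized "label" with | some n => (n : Int) | none => 0
  else if "class" ∈ normalized then
    match PySem.List.index? normalized "class" with | some n => (n : Int) | none => 0
  else if 5 < header.length then 5
  else 0   -- Python raises ValueError here; excluded by Pre_

-- ===== PORT B =====
def pvRanks : PySem.Dict String Int :=
  PySem.Dict.ofList [("activity", 0), ("action", 1), ("label", 2), ("class", 3)]

-- the for-loop over enumerate(header) with state (best_rank, best_idx)
def pvBLoop : List String → Int → Option Int × Option Int → Option Int × Option Int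
  | [], _, best => best
  | h :: t, i, (br, bi) =>
      pvBLoop t (i + 1)
        (match PySem.Dict.get? pvRanks (PySem.Str.lower (PySem.Str.strip h)) with
         | none => (br, bi)
         | some r =>
           match br with
           | none => (some r, some i)
           | some brv => if r < brv then (some r, some i) else (br, bi))

def get_activity_column_index_alt (header : List String) : Int :=
  match (pvBLoop header 0 (none, none)).2 with
  | some bi => bi
  | none =>
    if 5 < header.length then 5
    else 0   -- Python raises ValueError here; excluded by Pre_

-- ===== PRECONDITION & SPEC =====
-- Pre_ excludes exactly the inputs on which Python A raises ValueError: no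
-- activity/action/label/class column found and len(header) ≤ 5 (B raises there too).
def Pre_get_activity_column_index (header : List String) : Prop :=
  let normalized := header.map pvNorm
  "activity" ∈ normalized ∨ "action" ∈ normalized ∨ "label" ∈ normalized ∨
    "class" ∈ normalized ∨ 5 < header.length
instance (header : List String) : Decidable (Pre_get_activity_column_index header) := by
  unfold Pre_get_activity_column_index; infer_instance

def pvWitness_get_activity_column_index : List String := ["frame", " Activity "]

def Spec_get_activity_column_index (header : List String) (out : Int) : Prop := out = get_activity_column_index_alt header
instance (header : List String) (out : Int) : Decidable (Spec_get_activity_column_index header out) := by unfold Spec_get_activity_column_index; infer_instance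

-- ===== CLAIM (what is proved, stated in full; the proofs are below) =====
def Claim_equal_get_activity_column_index : Prop := ∀ (header : List String), Dom_get_activity_column_index header → Pre_get_activity_column_index header → Spec_get_activity_column_index header (get_activity_column_index header)

-- ===== LEMMAS AND PROOFS =====

-- rank lookup, as a total function of the (normalized) cell
def pvRk (s : String) : Option Int := PySem.Dict.get? pvRanks s

-- pick the smaller rank, earlier element on ties
def pvBetter : Option (Int × Int) → Option (Int × Int) → Option (Int × Int)
  | none, b => b
  | some a, none => some a
  | some a, some b => if b.1 < a.1 then some b else some a

-- functional scan over the normalized list, indices from i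
def pvScan : List String → Int → Option (Int × Int)
  | [], _ => none
  | h :: t, i => pvBetter ((pvRk h).map (fun r => (r, i))) (pvScan t (i + 1))

def pvEnc : Option (Int × Int) → Option Int × Option Int
  | none => (none, none)
  | some (r, j) => (some r, some j)

theorem pvRk_eq (s : String) :
    pvRk s = if s = "activity" then some 0 else if s = "action" then some 1
      else if s = "label" then some 2 else if s = "class" then some 3 else none := by
  have hmk : pvRanks = PySem.Dict.mk [("activity", 0), ("action", 1), ("label", 2), ("class", 3)] := by
    decide
  by_cases h1 : s = "activity"
  · subst h1; decide
  by_cases h2 : s = "action"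
  · subst h2; decide
  by_cases h3 : s = "label"
  · subst h3; decide
  by_cases h4 : s = "class"
  · subst h4; decide
  have n1 : ¬("activity" = s) := fun e => h1 e.symm
  have n2 : ¬("action" = s) := fun e => h2 e.symm
  have n3 : ¬("label" = s) := fun e => h3 e.symm
  have n4 : ¬("class" = s) := fun e => h4 e.symm
  simp [pvRk, hmk, PySem.Dict.get?_mk_cons, PySem.Dict.get?, beq_iff_eq,
    n1, n2, n3, n4, h1, h2, h3, h4]

theorem pvBetter_assoc (a b c : Option (Int × Int)) :
    pvBetter (pvBetter a b) c = pvBetter a (pvBetter b c) := by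
  rcases a with _ | ⟨x, xi⟩
  · rfl
  rcases b with _ | ⟨y, yi⟩
  · rfl
  rcases c with _ | ⟨z, zi⟩
  · by_cases h : y < x <;> simp [pvBetter, h]
  by_cases h1 : y < x <;> by_cases h2 : z < y <;> by_cases h3 : z < x <;>
    first
      | (exfalso; omega)
      | simp [pvBetter, h1, h2, h3]

theorem pvBLoop_eq_scan (l : List String) (i : Int) (o : Option (Int × Int)) :
    pvBLoop l i (pvEnc o) = pvEnc (pvBetter o (pvScan (l.map pvNorm) i)) := by
  induction l generalizing i o with
  | nil =>
    rcases o with _ | ⟨r, j⟩ <;> simp [pvBLoop, pvScan, pvBetter, pvEnc]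
  | cons h t ih =>
    rcases hrk : pvRk (pvNorm h) with _ | r <;>
      have hrk' : PySem.Dict.get? pvRanks (PySem.Str.lower (PySem.Str.strip h)) = pvRk (pvNorm h) := rfl
    · rcases o with _ | ⟨br, bi⟩
      · show pvBLoop t (i + 1) _ = _
        rw [hrk', hrk]
        show pvBLoop t (i + 1) (pvEnc none) = _
        rw [ih]
        simp [pvScan, hrk, pvBetter]
      · show pvBLoop t (i + 1) _ = _
        rw [hrk', hrk]
        show pvBLoop t (i + 1) (pvEnc (some (br, bi))) = _
        rw [ih]
        simp [pvScan, hrk, pvBetter]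
    · rcases o with _ | ⟨br, bi⟩
      · show pvBLoop t (i + 1) _ = _
        rw [hrk', hrk]
        show pvBLoop t (i + 1) (pvEnc (some (r, i))) = _
        rw [ih]
        simp [pvScan, hrk, pvBetter]
      · show pvBLoop t (i + 1) _ = _
        rw [hrk', hrk]
        by_cases hlt : r < br
        · show pvBLoop t (i + 1) (if r < br then (some r, some i) else (some br, some bi)) = _
          rw [if_pos hlt]
          show pvBLoop t (i + 1) (pvEnc (some (r, i))) = _
          rw [ih]
          simp only [List.map_cons, pvScan, hrk, Option.map_some, ← pvBetter_assoc]
          simp [pvBetter, hlt]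
        · show pvBLoop t (i + 1) (if r < br then (some r, some i) else (some br, some bi)) = _
          rw [if_neg hlt]
          show pvBLoop t (i + 1) (pvEnc (some (br, bi))) = _
          rw [ih]
          simp only [List.map_cons, pvScan, hrk, Option.map_some, ← pvBetter_assoc]
          simp [pvBetter, hlt]

theorem pvBetter_eq_or (a b : Option (Int × Int)) : pvBetter a b = a ∨ pvBetter a b = b := by
  rcases a with _ | ⟨x, xi⟩
  · exact Or.inr rfl
  rcases b with _ | ⟨y, yi⟩
  · exact Or.inl rfl
  by_cases h : y < x
  · exact Or.inr (by simp [pvBetter, h])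
  · exact Or.inl (by simp [pvBetter, h])

theorem pvScan_lb (l : List String) (k : Int)
    (hk : ∀ s ∈ l, ∀ r, pvRk s = some r → k ≤ r) :
    ∀ i r j, pvScan l i = some (r, j) → k ≤ r := by
  induction l with
  | nil => intro i r j h; simp [pvScan] at h
  | cons hd t ih =>
    intro i r j h
    simp only [pvScan] at h
    rcases pvBetter_eq_or ((pvRk hd).map (fun r => (r, i))) (pvScan t (i + 1)) with he | he <;>
      rw [he] at h
    · rcases hr : pvRk hd with _ | rv <;> rw [hr] at h
      · simp at h
      · simp only [Option.map_some, Option.some.injEq, Prod.mk.injEq] at h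
        exact h.1 ▸ hk hd (List.mem_cons_self) rv hr
    · exact ih (fun s hs => hk s (List.mem_cons_of_mem hd hs)) (i + 1) r j h

theorem pvScan_ge0 (l : List String) (i r j : Int) (h : pvScan l i = some (r, j)) : 0 ≤ r := by
  refine pvScan_lb l 0 ?_ i r j h
  intro s _ rv hr
  rw [pvRk_eq] at hr
  split_ifs at hr <;> simp_all <;> omega

theorem pvScan_ge1 (l : List String) (hna : "activity" ∉ l) (i r j : Int)
    (h : pvScan l i = some (r, j)) : 1 ≤ r := by
  refine pvScan_lb l 1 ?_ i r j h
  intro s hs rv hr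
  rw [pvRk_eq] at hr
  split_ifs at hr <;> simp_all <;> omega

theorem pvScan_ge2 (l : List String) (hna : "activity" ∉ l) (hnb : "action" ∉ l) (i r j : Int)
    (h : pvScan l i = some (r, j)) : 2 ≤ r := by
  refine pvScan_lb l 2 ?_ i r j h
  intro s hs rv hr
  rw [pvRk_eq] at hr
  split_ifs at hr <;> simp_all <;> omega

theorem pvScan_ge3 (l : List String) (hna : "activity" ∉ l) (hnb : "action" ∉ l)
    (hnc : "label" ∉ l) (i r j : Int) (h : pvScan l i = some (r, j)) : 3 ≤ r := by
  refine pvScan_lb l 3 ?_ i r j h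
  intro s hs rv hr
  rw [pvRk_eq] at hr
  split_ifs at hr <;> simp_all <;> omega


theorem pvScan_none (l : List String) (hna : "activity" ∉ l) (hnb : "action" ∉ l)
    (hnc : "label" ∉ l) (hnd : "class" ∉ l) (i : Int) : pvScan l i = none := by
  induction l generalizing i with
  | nil => rfl
  | cons hd t ih =>
    simp only [List.mem_cons, not_or] at hna hnb hnc hnd
    have hr : pvRk hd = none := by
      have n1 : ¬(hd = "activity") := fun e => hna.1 e.symm
      have n2 : ¬(hd = "action") := fun e => hnb.1 e.symm
      have n3 : ¬(hd = "label") := fun e => hnc.1 e.symm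
      have n4 : ¬(hd = "class") := fun e => hnd.1 e.symm
      rw [pvRk_eq, if_neg n1, if_neg n2, if_neg n3, if_neg n4]
    simp only [pvScan, hr, Option.map_none]
    show pvScan t (i + 1) = none
    exact ih hna.2 hnb.2 hnc.2 hnd.2 (i + 1)

theorem pvScan_activity (l : List String) (hm : "activity" ∈ l) (i : Int) :
    pvScan l i = (PySem.List.index? l "activity").map (fun (n : Nat) => ((0 : Int), i + (n : Int))) := by
  induction l generalizing i with
  | nil => cases hm
  | cons hd t ih =>

    by_cases hh : hd = "activity"
    · subst hh
      rw [PySem.List.index?_cons_self]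
      simp only [pvScan, pvRk_eq, if_pos rfl, Option.map_some]
      rcases ht : pvScan t (i + 1) with _ | ⟨r, j⟩
      · simp [pvBetter]
      · have h0 : (0 : Int) ≤ r := pvScan_ge0 t  (i + 1) r j ht
        simp [pvBetter, not_lt.mpr h0]
    · have hm' : "activity" ∈ t := by
        rcases List.mem_cons.mp hm with h | h
        · exact absurd h.symm hh
        · exact h
      obtain ⟨n, hn⟩ : ∃ n, PySem.List.index? t "activity" = some n :=
        Option.isSome_iff_exists.mp ((PySem.List.index?_isSome_iff _ _).mpr hm')
      rw [PySem.List.index?_cons_of_ne t hh, hn]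
      simp only [pvScan]
      rw [ih hm' (i + 1), hn]
      rcases hr : pvRk hd with _ | r
      · simp only [hr, Option.map_none, Option.map_some, pvBetter, Option.some.injEq,
          Prod.mk.injEq]
        refine ⟨trivial, ?_⟩
        push_cast
        first
        | omega
        | trivial
      · have hgt : (0 : Int) < r := by
          rw [pvRk_eq] at hr
          split_ifs at hr <;> simp_all <;> omega
        simp only [hr, Option.map_some, pvBetter, hgt, if_pos hgt, Option.some.injEq,
          Prod.mk.injEq]
        simp only [if_true, Option.some.injEq, Prod.mk.injEq]
        refine ⟨trivial, ?_⟩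
        push_cast
        omega

theorem pvScan_action (l : List String) (hna : "activity" ∉ l) (hm : "action" ∈ l) (i : Int) :
    pvScan l i = (PySem.List.index? l "action").map (fun (n : Nat) => ((1 : Int), i + (n : Int))) := by
  induction l generalizing i with
  | nil => cases hm
  | cons hd t ih =>
    simp only [List.mem_cons, not_or] at hna
    by_cases hh : hd = "action"
    · subst hh
      rw [PySem.List.index?_cons_self]
      simp only [pvScan, pvRk_eq, if_pos rfl, Option.map_some]
      rw [if_neg (by decide)]
      rcases ht : pvScan t (i + 1) with _ | ⟨r, j⟩
      · simp [pvBetter]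
      · have h0 : (1 : Int) ≤ r := pvScan_ge1 t hna.2 (i + 1) r j ht
        simp [pvBetter, not_lt.mpr h0]
    · have hm' : "action" ∈ t := by
        rcases List.mem_cons.mp hm with h | h
        · exact absurd h.symm hh
        · exact h
      obtain ⟨n, hn⟩ : ∃ n, PySem.List.index? t "action" = some n :=
        Option.isSome_iff_exists.mp ((PySem.List.index?_isSome_iff _ _).mpr hm')
      rw [PySem.List.index?_cons_of_ne t hh, hn]
      simp only [pvScan]
      rw [ih hna.2 hm' (i + 1), hn]
      rcases hr : pvRk hd with _ | r
      · simp only [hr, Option.map_none, Option.map_some, pvBetter, Option.some.injEq,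
          Prod.mk.injEq]
        refine ⟨trivial, ?_⟩
        push_cast
        first
        | omega
        | trivial
      · have hgt : (1 : Int) < r := by
          rw [pvRk_eq] at hr
          split_ifs at hr <;> simp_all <;> omega
        simp only [hr, Option.map_some, pvBetter, hgt, if_pos hgt, Option.some.injEq,
          Prod.mk.injEq]
        simp only [if_true, Option.some.injEq, Prod.mk.injEq]
        refine ⟨trivial, ?_⟩
        push_cast
        omega

theorem pvScan_label (l : List String) (hna : "activity" ∉ l) (hnb : "action" ∉ l)
    (hm : "label" ∈ l) (i : Int) :
    pvScan l i = (PySem.List.index? l "label").map (fun (n : Nat) => ((2 : Int), i + (n : Int))) := by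
  induction l generalizing i with
  | nil => cases hm
  | cons hd t ih =>
    simp only [List.mem_cons, not_or] at hna
    simp only [List.mem_cons, not_or] at hnb
    by_cases hh : hd = "label"
    · subst hh
      rw [PySem.List.index?_cons_self]
      simp only [pvScan, pvRk_eq, if_pos rfl, Option.map_some]
      rw [if_neg (by decide), if_neg (by decide)]
      rcases ht : pvScan t (i + 1) with _ | ⟨r, j⟩
      · simp [pvBetter]
      · have h0 : (2 : Int) ≤ r := pvScan_ge2 t hna.2 hnb.2 (i + 1) r j ht
        simp [pvBetter, not_lt.mpr h0]
    · have hm' : "label" ∈ t := by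
        rcases List.mem_cons.mp hm with h | h
        · exact absurd h.symm hh
        · exact h
      obtain ⟨n, hn⟩ : ∃ n, PySem.List.index? t "label" = some n :=
        Option.isSome_iff_exists.mp ((PySem.List.index?_isSome_iff _ _).mpr hm')
      rw [PySem.List.index?_cons_of_ne t hh, hn]
      simp only [pvScan]
      rw [ih hna.2 hnb.2 hm' (i + 1), hn]
      rcases hr : pvRk hd with _ | r
      · simp only [hr, Option.map_none, Option.map_some, pvBetter, Option.some.injEq,
          Prod.mk.injEq]
        refine ⟨trivial, ?_⟩
        push_cast
        first
        | omega
        | trivial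
      · have hgt : (2 : Int) < r := by
          rw [pvRk_eq] at hr
          split_ifs at hr <;> simp_all <;> omega
        simp only [hr, Option.map_some, pvBetter, hgt, if_pos hgt, Option.some.injEq,
          Prod.mk.injEq]
        simp only [if_true, Option.some.injEq, Prod.mk.injEq]
        refine ⟨trivial, ?_⟩
        push_cast
        omega

theorem pvScan_class (l : List String) (hna : "activity" ∉ l) (hnb : "action" ∉ l)
    (hnc : "label" ∉ l) (hm : "class" ∈ l) (i : Int) :
    pvScan l i = (PySem.List.index? l "class").map (fun (n : Nat) => ((3 : Int), i + (n : Int))) := by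
  induction l generalizing i with
  | nil => cases hm
  | cons hd t ih =>
    simp only [List.mem_cons, not_or] at hna
    simp only [List.mem_cons, not_or] at hnb
    simp only [List.mem_cons, not_or] at hnc
    by_cases hh : hd = "class"
    · subst hh
      rw [PySem.List.index?_cons_self]
      simp only [pvScan, pvRk_eq, if_pos rfl, Option.map_some]
      rw [if_neg (by decide), if_neg (by decide), if_neg (by decide)]
      rcases ht : pvScan t (i + 1) with _ | ⟨r, j⟩
      · simp [pvBetter]
      · have h0 : (3 : Int) ≤ r := pvScan_ge3 t hna.2 hnb.2 hnc.2 (i + 1) r j ht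
        simp [pvBetter, not_lt.mpr h0]
    · have hm' : "class" ∈ t := by
        rcases List.mem_cons.mp hm with h | h
        · exact absurd h.symm hh
        · exact h
      obtain ⟨n, hn⟩ : ∃ n, PySem.List.index? t "class" = some n :=
        Option.isSome_iff_exists.mp ((PySem.List.index?_isSome_iff _ _).mpr hm')
      rw [PySem.List.index?_cons_of_ne t hh, hn]
      simp only [pvScan]
      rw [ih hna.2 hnb.2 hnc.2 hm' (i + 1), hn]
      rcases hr : pvRk hd with _ | r
      · simp only [hr, Option.map_none, Option.map_some, pvBetter, Option.some.injEq,
          Prod.mk.injEq]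
        refine ⟨trivial, ?_⟩
        push_cast
        first
        | omega
        | trivial
      · have hgt : (3 : Int) < r := by
          rw [pvRk_eq] at hr
          split_ifs at hr <;> simp_all <;> omega
        simp only [hr, Option.map_some, pvBetter, hgt, if_pos hgt, Option.some.injEq,
          Prod.mk.injEq]
        simp only [if_true, Option.some.injEq, Prod.mk.injEq]
        refine ⟨trivial, ?_⟩
        push_cast
        omega

theorem alt_eq_scan (header : List String) :
    get_activity_column_index_alt header =
      match pvScan (header.map pvNorm) 0 with
      | some (_, j) => j
      | none => if 5 < header.length then (5 : Int) else 0 := by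
  unfold get_activity_column_index_alt
  rw [show ((none, none) : Option Int × Option Int) = pvEnc none from rfl,
    pvBLoop_eq_scan header 0 none]
  rcases pvScan (header.map pvNorm) 0 with _ | ⟨r, j⟩ <;> simp [pvBetter, pvEnc]

-- ===== VERDICT (by name: the statement is the Claim_ definition above) =====
theorem get_activity_column_index_spec : Claim_equal_get_activity_column_index := by
  intro header _ _
  unfold Spec_get_activity_column_index
  rw [alt_eq_scan]
  unfold get_activity_column_index
  simp only []
  by_cases m1 : "activity" ∈ header.map pvNorm
  · obtain ⟨n, hn⟩ : ∃ n, PySem.List.index? (header.map pvNorm) "activity" = some n :=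
      Option.isSome_iff_exists.mp ((PySem.List.index?_isSome_iff _ _).mpr m1)
    rw [if_pos m1, hn, pvScan_activity _ m1 0, hn]
    simp
  rw [if_neg m1]
  by_cases m2 : "action" ∈ header.map pvNorm
  · obtain ⟨n, hn⟩ : ∃ n, PySem.List.index? (header.map pvNorm) "action" = some n :=
      Option.isSome_iff_exists.mp ((PySem.List.index?_isSome_iff _ _).mpr m2)
    rw [if_pos m2, hn, pvScan_action _ m1 m2 0, hn]
    simp
  rw [if_neg m2]
  by_cases m3 : "label" ∈ header.map pvNorm
  · obtain ⟨n, hn⟩ : ∃ n, PySem.List.index? (header.map pvNorm) "label" = some n :=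
      Option.isSome_iff_exists.mp ((PySem.List.index?_isSome_iff _ _).mpr m3)
    rw [if_pos m3, hn, pvScan_label _ m1 m2 m3 0, hn]
    simp
  rw [if_neg m3]
  by_cases m4 : "class" ∈ header.map pvNorm
  · obtain ⟨n, hn⟩ : ∃ n, PySem.List.index? (header.map pvNorm) "class" = some n :=
      Option.isSome_iff_exists.mp ((PySem.List.index?_isSome_iff _ _).mpr m4)
    rw [if_pos m4, hn, pvScan_class _ m1 m2 m3 m4 0, hn]
    simp
  rw [if_neg m4, pvScan_none _ m1 m2 m3 m4 0]
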